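-- pv_equiv track=rewrite | github.com/alextran2024/AIO_20-days-effort | day6.py | cal_pad_matrix
-- ===== SOURCE A (Python) =====
-- def cal_pad_matrix(matrix, pad):
--     rows = len(matrix)
--     cols = len(matrix[0])
--     new_rows = len(matrix) + pad*2
--     new_cols = len(matrix[0]) + pad*2
--
--     # 1.1
--     pad_matrix = [[0 for _ in range(new_cols)] for _ in range(new_rows)]
--     # 1.2
--     for i in range(rows):
--         for j in range(cols):
--             pad_matrix[i+pad][j+pad] = matrix[i][j]
--     return pad_matrix
-- ===== SOURCE B (Python) =====
-- def cal_pad_matrix(matrix, pad):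
--     cols = len(matrix[0])
--     new_cols = cols + 2 * pad
--     top = [[0] * new_cols for _ in range(pad)]
--     bottom = [[0] * new_cols for _ in range(pad)]
--     middle = [[0] * pad + [row[j] for j in range(cols)] + [0] * pad
--               for row in matrix]
--     return top + middle + bottom
-- ===== Notes on version B (the rewrite author's own statement) =====
-- stated objective: simpler
-- what changed: B builds the padded matrix directly row by row (zero border rows, then each original row flanked by zero pads) instead of allocating a full zero grid and overwriting its interior cell by cell.
-- outside the precondition, e.g. on cal_pad_matrix([[], [], []], -1): A returns [[]], B returns [[], [], []]
import Mathlib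
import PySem

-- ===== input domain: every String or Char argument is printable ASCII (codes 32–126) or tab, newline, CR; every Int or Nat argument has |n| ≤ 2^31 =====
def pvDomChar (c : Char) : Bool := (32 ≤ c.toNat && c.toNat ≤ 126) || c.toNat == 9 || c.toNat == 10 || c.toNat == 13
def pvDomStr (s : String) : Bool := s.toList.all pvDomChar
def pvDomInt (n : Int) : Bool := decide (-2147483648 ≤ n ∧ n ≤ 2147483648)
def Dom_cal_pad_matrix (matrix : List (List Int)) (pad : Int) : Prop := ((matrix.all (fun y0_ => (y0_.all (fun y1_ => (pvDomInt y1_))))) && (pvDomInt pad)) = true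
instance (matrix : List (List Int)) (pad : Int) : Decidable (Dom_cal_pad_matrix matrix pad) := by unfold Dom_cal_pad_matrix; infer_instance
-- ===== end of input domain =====

-- B builds the padded matrix directly row by row instead of allocating a full zero
-- grid and overwriting its interior cell by cell (objective: simpler).

-- ===== PORT A =====
-- Python list item assignment xs[i] = v (i possibly negative); on out-of-range index
-- Python raises IndexError (excluded by Pre_), here the list is returned unchanged.
def pvSet {α : Type} (xs : List α) (i : Int) (v : α) : List α :=
  if i < 0 then
    (if 0 ≤ i + xs.length then xs.set (i + xs.length).toNat v else xs)
  else xs.set i.toNat v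

def cal_pad_matrix (matrix : List (List Int)) (pad : Int) : List (List Int) :=
  let rows : Int := matrix.length
  let cols : Int := ((PySem.List.pyGet? matrix 0).getD []).length
  let new_rows : Int := matrix.length + pad * 2
  let new_cols : Int := ((PySem.List.pyGet? matrix 0).getD []).length + pad * 2
  let pad_matrix : List (List Int) :=
    (PySem.List.pyRange 0 new_rows 1).map
      (fun _ => (PySem.List.pyRange 0 new_cols 1).map (fun _ => (0 : Int)))
  (PySem.List.pyRange 0 rows 1).foldl
    (fun pm i =>
      (PySem.List.pyRange 0 cols 1).foldl
        (fun pm j =>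
          pvSet pm (i + pad)
            (pvSet ((PySem.List.pyGet? pm (i + pad)).getD []) (j + pad)
              ((PySem.List.pyGet? ((PySem.List.pyGet? matrix i).getD []) j).getD 0)))
        pm)
    pad_matrix

-- ===== PORT B =====
def cal_pad_matrix_alt (matrix : List (List Int)) (pad : Int) : List (List Int) :=
  let cols : Int := ((PySem.List.pyGet? matrix 0).getD []).length
  let new_cols : Int := cols + 2 * pad
  let top := (PySem.List.pyRange 0 pad 1).map (fun _ => PySem.List.pyRepeat [(0 : Int)] new_cols)
  let bottom := (PySem.List.pyRange 0 pad 1).map (fun _ => PySem.List.pyRepeat [(0 : Int)] new_cols)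
  let middle := matrix.map (fun row =>
    PySem.List.pyRepeat [(0 : Int)] pad
      ++ (PySem.List.pyRange 0 cols 1).map (fun j => (PySem.List.pyGet? row j).getD 0)
      ++ PySem.List.pyRepeat [(0 : Int)] pad)
  top ++ middle ++ bottom

-- ===== PRECONDITION & SPEC =====
-- Pre_ excludes: the empty matrix (A raises IndexError on matrix[0]), rows shorter
-- than the first row (A raises IndexError on matrix[i][j]), and negative pad, on
-- which A raises IndexError except in the accidental corner of an empty first row,
-- where its shrunken zero grid ([[0]*(c+2p) for ...]) returns fewer rows than the input.
def Pre_cal_pad_matrix (matrix : List (List Int)) (pad : Int) : Prop :=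
  matrix ≠ [] ∧ 0 ≤ pad ∧ ∀ row ∈ matrix, (matrix.headD []).length ≤ row.length
instance (matrix : List (List Int)) (pad : Int) : Decidable (Pre_cal_pad_matrix matrix pad) := by unfold Pre_cal_pad_matrix; infer_instance
def pvWitness_cal_pad_matrix : List (List Int) × Int := ([[1, 2], [3, 4]], 1)

def Spec_cal_pad_matrix (matrix : List (List Int)) (pad : Int) (out : List (List Int)) : Prop := out = cal_pad_matrix_alt matrix pad
instance (matrix : List (List Int)) (pad : Int) (out : List (List Int)) : Decidable (Spec_cal_pad_matrix matrix pad out) := by unfold Spec_cal_pad_matrix; infer_instance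

-- ===== CLAIM (what is proved, stated in full; the proofs are below) =====
def Claim_equal_cal_pad_matrix : Prop := ∀ (matrix : List (List Int)) (pad : Int), Dom_cal_pad_matrix matrix pad → Pre_cal_pad_matrix matrix pad → Spec_cal_pad_matrix matrix pad (cal_pad_matrix matrix pad)

-- ===== LEMMAS AND PROOFS =====

-- normal-form building blocks used by the proofs
def pvZ (c p : Nat) : List Int := List.replicate (c + 2 * p) (0 : Int)

def pvFill (c p : Nat) (row : List Int) : List Int :=
  List.replicate p (0 : Int)
    ++ (List.range c).map (fun j => row[j]?.getD (0 : Int))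
    ++ List.replicate p (0 : Int)

theorem pvSet_natCast {α : Type} (xs : List α) (n : Nat) (v : α) :
    pvSet xs ((n : Int)) v = xs.set n v := by
  simp [pvSet]

theorem pvSet_append_len {α : Type} (l1 l2 : List α) (a : α) :
    (l1 ++ l2).set l1.length a = l1 ++ l2.set 0 a := by
  induction l1 with
  | nil => simp
  | cons x xs ih => simp [ih]

theorem pvFoldSetRow {α : Type} (js : List Nat) (k : Nat) (f : List α → Nat → List α) :
    ∀ pm : List (List α),
      js.foldl (fun pm j => pm.set k (f (pm[k]?.getD []) j)) pm
        = pm.set k (js.foldl f (pm[k]?.getD [])) := by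
  induction js with
  | nil =>
    intro pm
    by_cases h : k < pm.length
    · simp [List.getElem?_eq_getElem h, List.set_getElem_self]
    · simp [List.set_eq_of_length_le (le_of_not_gt h)]
  | cons j js ih =>
    intro pm
    by_cases h : k < pm.length
    · have h1 : (pm.set k (f (pm[k]?.getD []) j))[k]?.getD [] = f (pm[k]?.getD []) j := by
        simp [List.getElem?_set_self h]
      simp only [List.foldl_cons, ih, h1, List.set_set]
    · have hle : pm.length ≤ k := le_of_not_gt h
      have h0 : pm[k]? = none := by simp; omega
      simp only [List.foldl_cons, ih, h0, List.set_eq_of_length_le hle]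

theorem pvGridFold {α : Type} (z d : α) (F : Nat → α → α) (p r : Nat) :
    ∀ m, m ≤ r →
      (List.range m).foldl (fun pm i => pm.set (i + p) (F i (pm[i + p]?.getD d)))
          (List.replicate (r + 2 * p) z)
        = List.replicate p z ++ (List.range m).map (fun i => F i z)
            ++ List.replicate (r - m + p) z := by
  intro m
  induction m with
  | zero =>
    intro _
    have : r + 2 * p = p + (r - 0 + p) := by omega
    simp only [List.range_zero, List.foldl_nil, List.map_nil, List.append_nil,
      this, List.replicate_add]
  | succ m ih =>
    intro hm
    rw [List.range_succ, List.foldl_append, ih (by omega)]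
    rw [List.foldl_cons, List.foldl_nil]
    have hidx : m + p = (List.replicate p z ++ (List.range m).map (fun i => F i z)).length := by
      simp; omega
    have hrep : List.replicate (r - m + p) z = z :: List.replicate (r - (m + 1) + p) z := by
      have h : r - m + p = (r - (m + 1) + p) + 1 := by omega
      rw [h, List.replicate_succ]
    rw [hidx, List.getElem?_append_right (Nat.le_refl _), Nat.sub_self, pvSet_append_len]
    rw [hrep]
    simp

theorem pvMapRangeGetD {β γ : Type} (F : β → γ) (d : β) :
    ∀ xs : List β,
      (List.range xs.length).map (fun i => F (xs[i]?.getD d)) = xs.map F := by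
  intro xs
  induction xs with
  | nil => simp
  | cons x xs ih =>
    simp only [List.length_cons, List.range_succ_eq_map, List.map_cons, List.map_map]
    simp only [Function.comp_def, List.getElem?_cons_succ, List.getElem?_cons_zero,
      Option.getD_some]
    rw [ih]
theorem pvAlt_eq (matrix : List (List Int)) (p : Nat) :
    cal_pad_matrix_alt matrix (p : Int)
      = List.replicate p (pvZ (matrix.headD []).length p)
          ++ matrix.map (pvFill (matrix.headD []).length p)
          ++ List.replicate p (pvZ (matrix.headD []).length p) := by
  have hhead : (PySem.List.pyGet? matrix 0).getD [] = matrix.headD [] := by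
    cases matrix <;> simp [PySem.List.pyGet?_zero]
  have hc : (((matrix.headD []).length : Int) + 2 * (p : Int)).toNat
      = (matrix.headD []).length + 2 * p := by omega
  unfold cal_pad_matrix_alt
  simp only [hhead, PySem.List.pyRange_one, PySem.List.pyRepeat_singleton, hc,
    List.map_map, Function.comp_def, zero_add, PySem.List.pyGet?_natCast,
    List.map_const', List.length_range, pvZ, Int.toNat_natCast, sub_zero]
  rfl

theorem pvA_eq (matrix : List (List Int)) (p : Nat) :
    cal_pad_matrix matrix (p : Int)
      = List.replicate p (pvZ (matrix.headD []).length p)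
          ++ matrix.map (pvFill (matrix.headD []).length p)
          ++ List.replicate p (pvZ (matrix.headD []).length p) := by
  have hhead : (PySem.List.pyGet? matrix 0).getD [] = matrix.headD [] := by
    cases matrix <;> simp [PySem.List.pyGet?_zero]
  have hgrid : ((matrix.length : Int) + (p : Int) * 2).toNat = matrix.length + 2 * p := by
    omega
  have hcc : (((matrix.headD []).length : Int) + (p : Int) * 2).toNat
      = (matrix.headD []).length + 2 * p := by omega
  unfold cal_pad_matrix
  simp only [hhead, PySem.List.pyRange_one, hgrid, hcc, List.map_map, Function.comp_def,
    zero_add, List.map_const', List.length_range, sub_zero, Int.toNat_natCast,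
    List.foldl_map]
  rw [PySem.List.foldl_congr_mem (g := fun pm (i : Nat) =>
    pm.set (i + p) ((List.range (matrix.headD []).length).foldl
      (fun b (j : Nat) => b.set (j + p) ((matrix[i]?.getD [])[j]?.getD 0))
      (pm[i + p]?.getD [])))]
  · have hz : List.replicate ((matrix.headD []).length + 2 * p) (0 : Int)
        = pvZ (matrix.headD []).length p := rfl
    rw [hz, pvGridFold (pvZ (matrix.headD []).length p) []
      (fun i b => (List.range (matrix.headD []).length).foldl
        (fun b (j : Nat) => b.set (j + p) ((matrix[i]?.getD [])[j]?.getD 0)) b)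
      p matrix.length matrix.length (Nat.le_refl _)]
    simp only [Nat.sub_self, Nat.zero_add]
    congr 1
    congr 1
    rw [← pvMapRangeGetD (pvFill (matrix.headD []).length p) [] matrix]
    refine List.map_congr_left ?_
    intro i _
    have := pvGridFold (0 : Int) (0 : Int)
      (fun j _ => (matrix[i]?.getD [])[j]?.getD 0) p (matrix.headD []).length
      (matrix.headD []).length (Nat.le_refl _)
    simp only [Nat.sub_self, Nat.zero_add] at this
    simpa [pvZ, pvFill] using this
  · intro pm i _
    simp only [← Nat.cast_add, pvSet_natCast, PySem.List.pyGet?_natCast]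
    exact pvFoldSetRow (List.range (matrix.headD []).length) (i + p)
      (fun b j => b.set (j + p) ((matrix[i]?.getD [])[j]?.getD 0)) pm

theorem cal_pad_matrix_main (matrix : List (List Int)) (pad : Int)
    (hpre : Pre_cal_pad_matrix matrix pad) :
    cal_pad_matrix matrix pad = cal_pad_matrix_alt matrix pad := by
  obtain ⟨p, rfl⟩ := Int.eq_ofNat_of_zero_le hpre.2.1
  rw [pvA_eq, pvAlt_eq]

-- ===== VERDICT (by name: the statement is the Claim_ definition above) =====
theorem cal_pad_matrix_spec : Claim_equal_cal_pad_matrix := by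
  intro matrix pad _ hpre
  exact cal_pad_matrix_main matrix pad hpre
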